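-- pv_equiv track=rewrite | github.com/haydenzyu/EECS118 | GeometryProblemSolver/M261.py | is_same_edge
-- ===== SOURCE A (Python) =====
-- def is_same_edge(n1, n2):
--     edges = [['sb1', 'sa3', 'sc4'],
--         ['sc1', 'sb3', 'sd4'],
--         ['sa2', 'sa4', 'sa5'],
--         ['sb2', 'sb4', 'sb5']]
--     for e in edges:
--         if n1 in e and n2 in e:
--             return True
--     return False
-- ===== SOURCE B (Python) =====
-- _EDGES = [['sb1', 'sa3', 'sc4'],
--           ['sc1', 'sb3', 'sd4'],
--           ['sa2', 'sa4', 'sa5'],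
--           ['sb2', 'sb4', 'sb5']]
--
-- # inverted index: node label -> set of edge indices containing it
-- _INDEX = {}
-- for _i, _e in enumerate(_EDGES):
--     for _n in _e:
--         _INDEX.setdefault(_n, set()).add(_i)
--
--
-- def is_same_edge(n1, n2):
--     return bool(_INDEX.get(n1, set()) & _INDEX.get(n2, set()))
-- ===== Notes on version B (the rewrite author's own statement) =====
-- stated objective: idiomatic
-- what changed: Replaces the per-call scan over all edges with double list-membership tests by a module-level inverted index (node -> set of edge indices) built once; the call itself is two dict lookups and a set intersection.
import Mathlib
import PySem

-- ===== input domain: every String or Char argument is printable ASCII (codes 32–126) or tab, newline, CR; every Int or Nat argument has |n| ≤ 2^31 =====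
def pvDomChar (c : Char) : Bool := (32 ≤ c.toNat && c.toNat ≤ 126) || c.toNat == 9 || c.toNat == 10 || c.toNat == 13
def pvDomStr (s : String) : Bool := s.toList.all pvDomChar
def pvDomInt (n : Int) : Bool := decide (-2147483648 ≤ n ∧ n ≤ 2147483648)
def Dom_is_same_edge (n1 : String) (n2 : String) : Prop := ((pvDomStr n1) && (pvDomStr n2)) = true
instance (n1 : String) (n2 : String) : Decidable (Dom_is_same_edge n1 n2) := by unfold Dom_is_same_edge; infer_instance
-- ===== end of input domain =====

-- B replaces A's per-call scan over all edges (double membership test per edge) by a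
-- precomputed inverted index node -> set of edge indices; the call is two lookups + intersection. (objective: idiomatic)


-- ===== PORT A =====
-- the fixed edge table of A
def pvEdgesA : List (List String) :=
  [["sb1", "sa3", "sc4"],
   ["sc1", "sb3", "sd4"],
   ["sa2", "sa4", "sa5"],
   ["sb2", "sb4", "sb5"]]

-- the 'for e in edges: if n1 in e and n2 in e: return True' loop, with early return
def pvLoopA (n1 n2 : String) : List (List String) → Bool
  | [] => false
  | e :: rest => if e.contains n1 && e.contains n2 then true else pvLoopA n1 n2 rest

def is_same_edge (n1 : String) (n2 : String) : Bool :=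
  pvLoopA n1 n2 pvEdgesA

-- ===== PORT B =====
def pvEdgesB : List (List String) :=
  [["sb1", "sa3", "sc4"],
   ["sc1", "sb3", "sd4"],
   ["sa2", "sa4", "sa5"],
   ["sb2", "sb4", "sb5"]]

-- module-level inverted index: node -> set of edge indices  (_INDEX.setdefault(n, set()).add(i))
def pvIndexB : PySem.Dict String (PySem.Set Int) :=
  (PySem.List.enumerate pvEdgesB 0).foldl
    (fun d p => p.2.foldl (fun d n => PySem.Dict.modify d n PySem.Set.empty (fun s => PySem.Set.add s p.1)) d)
    PySem.Dict.empty

def is_same_edge_alt (n1 : String) (n2 : String) : Bool :=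
  !(PySem.Set.inter (PySem.Dict.getD pvIndexB n1 PySem.Set.empty)
                    (PySem.Dict.getD pvIndexB n2 PySem.Set.empty)).isEmpty

-- ===== PRECONDITION & SPEC =====
def Spec_is_same_edge (n1 : String) (n2 : String) (out : Bool) : Prop := out = is_same_edge_alt n1 n2
instance (n1 : String) (n2 : String) (out : Bool) : Decidable (Spec_is_same_edge n1 n2 out) := by unfold Spec_is_same_edge; infer_instance

-- ===== CLAIM (what is proved, stated in full; the proofs are below) =====
def Claim_equal_is_same_edge : Prop := ∀ (n1 : String) (n2 : String), Dom_is_same_edge n1 n2 → Spec_is_same_edge n1 n2 (is_same_edge n1 n2)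

-- ===== LEMMAS AND PROOFS =====
-- the 12 node labels occurring in the edge table
def pvNodes : List String :=
  ["sb1", "sa3", "sc4", "sc1", "sb3", "sd4", "sa2", "sa4", "sa5", "sb2", "sb4", "sb5"]

lemma pvA_false_left (n1 n2 : String) (h : n1 ∉ pvNodes) : is_same_edge n1 n2 = false := by
  simp [pvNodes] at h
  obtain ⟨h1, h2, h3, h4, h5, h6, h7, h8, h9, h10, h11, h12⟩ := h
  simp [is_same_edge, pvLoopA, pvEdgesA, h1, h2, h3, h4, h5, h6, h7, h8, h9, h10, h11, h12]

lemma pvA_false_right (n1 n2 : String) (h : n2 ∉ pvNodes) : is_same_edge n1 n2 = false := by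
  simp [pvNodes] at h
  obtain ⟨h1, h2, h3, h4, h5, h6, h7, h8, h9, h10, h11, h12⟩ := h
  simp [is_same_edge, pvLoopA, pvEdgesA, h1, h2, h3, h4, h5, h6, h7, h8, h9, h10, h11, h12]

lemma pvIndexB_items :
    pvIndexB = ⟨[("sb1", [0]), ("sa3", [0]), ("sc4", [0]),
                 ("sc1", [1]), ("sb3", [1]), ("sd4", [1]),
                 ("sa2", [2]), ("sa4", [2]), ("sa5", [2]),
                 ("sb2", [3]), ("sb4", [3]), ("sb5", [3])]⟩ := by decide

lemma pvB_getD_empty (n : String) (h : n ∉ pvNodes) :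
    PySem.Dict.getD pvIndexB n PySem.Set.empty = PySem.Set.empty := by
  rw [pvIndexB_items]
  simp only [PySem.Dict.getD, PySem.Dict.get?]
  rw [List.find?_eq_none.mpr]
  · rfl
  · intro x hx
    have hm : x.1 ∈ pvNodes := by fin_cases hx <;> decide
    simp only [beq_iff_eq]
    intro e
    exact h (e ▸ hm)

lemma pvB_false_left (n1 n2 : String) (h : n1 ∉ pvNodes) : is_same_edge_alt n1 n2 = false := by
  unfold is_same_edge_alt
  rw [pvB_getD_empty n1 h]
  simp [PySem.Set.inter, PySem.Set.empty]

lemma pvB_false_right (n1 n2 : String) (h : n2 ∉ pvNodes) : is_same_edge_alt n1 n2 = false := by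
  unfold is_same_edge_alt
  rw [pvB_getD_empty n2 h]
  simp [PySem.Set.inter, PySem.Set.empty]

-- ===== VERDICT (by name: the statement is the Claim_ definition above) =====
theorem is_same_edge_spec : Claim_equal_is_same_edge := by
  intro n1 n2 _
  unfold Spec_is_same_edge
  by_cases h1 : n1 ∈ pvNodes
  · by_cases h2 : n2 ∈ pvNodes
    · simp [pvNodes] at h1 h2
      rcases h1 with rfl | rfl | rfl | rfl | rfl | rfl | rfl | rfl | rfl | rfl | rfl | rfl <;>
        rcases h2 with rfl | rfl | rfl | rfl | rfl | rfl | rfl | rfl | rfl | rfl | rfl | rfl <;>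
        decide
    · rw [pvA_false_right n1 n2 h2, pvB_false_right n1 n2 h2]
  · rw [pvA_false_left n1 n2 h1, pvB_false_left n1 n2 h1]
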